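-- pv_equiv track=rewrite | github.com/ariuk44/retake_exam_prep | day_5.py | matches1
-- ===== SOURCE A (Python) =====
-- def matches1(arr,  p):
--     i = 0
--     for seq in p:
--         need = abs(seq)
--         want_pos = seq > 0
--         for _ in range(need):
--             if i >= len(arr):
--                 return 0
--             v = arr[i]
--             if want_pos:
--                 if v <= 0:
--                     return 0
--             else:
--                 if v >= 0:
--                     return 0
--             i += 1
--     return 1 if i == len(arr) else 0
-- ===== SOURCE B (Python) =====
-- def matches1(arr, p):
--     E = []
--     for seq in p:
--         if len(E) + abs(seq) > len(arr):
--             return 0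
--         E.extend([seq > 0] * abs(seq))
--     if len(E) != len(arr):
--         return 0
--     for v, w in zip(arr, E):
--         if (w and v <= 0) or ((not w) and v >= 0):
--             return 0
--     return 1
-- ===== Notes on version B (the rewrite author's own statement) =====
-- stated objective: simpler
-- what changed: B materializes the expected sign pattern (one bool per required element, returning 0 early if the pattern would outgrow arr), rejects on a length mismatch, then does one flat zip pass, replacing A's interleaved nested loops with a running index and trailing length check.
import Mathlib
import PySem

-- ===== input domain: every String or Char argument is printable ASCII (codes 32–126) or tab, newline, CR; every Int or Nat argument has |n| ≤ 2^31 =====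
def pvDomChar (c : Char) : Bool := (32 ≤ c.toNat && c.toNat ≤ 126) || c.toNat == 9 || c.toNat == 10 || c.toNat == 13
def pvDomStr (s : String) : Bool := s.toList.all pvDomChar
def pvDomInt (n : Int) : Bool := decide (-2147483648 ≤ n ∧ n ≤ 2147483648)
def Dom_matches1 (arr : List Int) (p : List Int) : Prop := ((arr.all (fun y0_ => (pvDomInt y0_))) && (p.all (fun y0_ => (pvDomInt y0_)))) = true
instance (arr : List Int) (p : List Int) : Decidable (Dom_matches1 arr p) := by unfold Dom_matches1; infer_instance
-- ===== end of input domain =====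

-- B materializes the expected sign pattern once and compares it to arr in one flat pass (simpler decomposition);
-- A walks arr with a running index inside nested loops. Equivalence of return values is proved on all inputs.

-- ===== PORT A =====
-- inner 'for _ in range(need)' loop; early 'return 0' is modeled as none
def matches1Inner (arr : List Int) (want_pos : Bool) : Nat → Nat → Option Nat
  | 0, i => some i
  | n + 1, i =>
    if i ≥ arr.length then none
    else
      let v := arr.getD i 0
      if want_pos then
        if v ≤ 0 then none else matches1Inner arr want_pos n (i + 1)
      else
        if v ≥ 0 then none else matches1Inner arr want_pos n (i + 1)

def matches1 (arr : List Int) (p : List Int) : Int :=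
  let r := p.foldl (fun acc seq =>
    match acc with
    | none => none
    | some i => matches1Inner arr (decide (seq > 0)) seq.natAbs i) (some 0)
  match r with
  | none => 0
  | some i => if i = arr.length then 1 else 0

-- ===== PORT B =====
-- builds the expected pattern E; 'return 0' when it would outgrow arr is modeled as none
def matches1AltBuild (arrLen : Nat) : List Int → List Bool → Option (List Bool)
  | [], E => some E
  | seq :: p, E =>
    if E.length + seq.natAbs > arrLen then none
    else matches1AltBuild arrLen p (E ++ List.replicate seq.natAbs (decide (seq > 0)))

def matches1_alt (arr : List Int) (p : List Int) : Int :=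
  match matches1AltBuild arr.length p [] with
  | none => 0
  | some E =>
    if E.length ≠ arr.length then 0
    else if (arr.zip E).all (fun vw => !((vw.2 && decide (vw.1 ≤ 0)) || (!vw.2 && decide (vw.1 ≥ 0)))) then 1
    else 0

-- ===== PRECONDITION & SPEC =====
def Spec_matches1 (arr : List Int) (p : List Int) (out : Int) : Prop := out = matches1_alt arr p
instance (arr : List Int) (p : List Int) (out : Int) : Decidable (Spec_matches1 arr p out) := by unfold Spec_matches1; infer_instance

-- ===== CLAIM (what is proved, stated in full; the proofs are below) =====
def Claim_equal_matches1 : Prop := ∀ (arr : List Int) (p : List Int), Dom_matches1 arr p → Spec_matches1 arr p (matches1 arr p)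

-- ===== LEMMAS AND PROOFS =====

-- sequential check of arr against a flat expected-sign list, starting at index i
def specCheck (arr : List Int) : Nat → List Bool → Option Nat
  | i, [] => some i
  | i, w :: es =>
    if i < arr.length then
      if (if w then arr.getD i 0 > 0 else arr.getD i 0 < 0) then specCheck arr (i + 1) es else none
    else none

theorem inner_eq_specCheck (arr : List Int) (w : Bool) :
    ∀ (n i : Nat), matches1Inner arr w n i = specCheck arr i (List.replicate n w) := by
  intro n
  induction n with
  | zero => intro i; simp [matches1Inner, List.replicate, specCheck]
  | succ n ih =>
    intro i
    rw [List.replicate_succ]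
    simp only [matches1Inner, specCheck]
    by_cases h : i < arr.length
    · rw [if_neg (Nat.not_le.mpr h), if_pos h]
      have hg : arr.getD i 0 = arr[i] := List.getD_eq_getElem arr 0 h
      rw [hg]
      cases w with
      | true =>
        by_cases hv : arr[i] ≤ 0
        · simp [hv, show ¬ ((0:Int) < arr[i]) by omega]
        · simp [hv, show (0:Int) < arr[i] by omega, ih]
      | false =>
        by_cases hv : (0:Int) ≤ arr[i]
        · simp [hv, show ¬ (arr[i] < 0) by omega]
        · simp [hv, show arr[i] < 0 by omega, ih]
    · rw [if_pos (Nat.le_of_not_lt h), if_neg h]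

theorem specCheck_append (arr : List Int) :
    ∀ (es1 es2 : List Bool) (i : Nat),
      specCheck arr i (es1 ++ es2) =
        (specCheck arr i es1).bind (fun j => specCheck arr j es2) := by
  intro es1
  induction es1 with
  | nil => intro es2 i; simp [specCheck]
  | cons w es ih =>
    intro es2 i
    simp only [List.cons_append, specCheck]
    by_cases h : i < arr.length
    · rw [if_pos h, if_pos h]
      by_cases hv : (if w then arr.getD i 0 > 0 else arr.getD i 0 < 0)
      · rw [if_pos hv, if_pos hv, ih]
      · rw [if_neg hv, if_neg hv]; rfl
    · rw [if_neg h, if_neg h]; rfl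

-- the flat expected pattern
def patE (p : List Int) : List Bool := p.flatMap (fun s => List.replicate s.natAbs (decide (s > 0)))

theorem foldA_none (arr : List Int) (p : List Int) :
    p.foldl (fun acc seq =>
      match acc with
      | none => none
      | some i => matches1Inner arr (decide (seq > 0)) seq.natAbs i) none = (none : Option Nat) := by
  induction p with
  | nil => rfl
  | cons s p ih => simpa using ih

theorem foldA_eq_specCheck (arr : List Int) :
    ∀ (p : List Int) (i : Nat),
      p.foldl (fun acc seq =>
        match acc with
        | none => none
        | some i => matches1Inner arr (decide (seq > 0)) seq.natAbs i) (some i)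
      = specCheck arr i (patE p) := by
  intro p
  induction p with
  | nil => intro i; simp [patE, specCheck]
  | cons s p ih =>
    intro i
    rw [List.foldl_cons]
    show (p.foldl _ (matches1Inner arr (decide (s > 0)) s.natAbs i)) = _
    have hE : patE (s :: p) = List.replicate s.natAbs (decide (s > 0)) ++ patE p := by
      simp [patE]
    rw [hE, specCheck_append, inner_eq_specCheck]
    cases h : specCheck arr i (List.replicate s.natAbs (decide (s > 0))) with
    | none => simpa using foldA_none arr p
    | some j => simpa using ih j

def okB (vw : Int × Bool) : Bool := !((vw.2 && decide (vw.1 ≤ 0)) || (!vw.2 && decide (vw.1 ≥ 0)))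

theorem specCheck_iff (arr : List Int) :
    ∀ (es : List Bool) (i : Nat), i ≤ arr.length →
      (specCheck arr i es = some arr.length ↔
        (i + es.length = arr.length ∧ ((arr.drop i).zip es).all okB = true)) := by
  intro es
  induction es with
  | nil =>
    intro i hi
    simp [specCheck, List.zip_nil_right]
  | cons w es ih =>
    intro i hi
    simp only [specCheck, List.length_cons]
    by_cases h : i < arr.length
    · rw [if_pos h]
      have hdrop : arr.drop i = arr[i] :: arr.drop (i + 1) := List.drop_eq_getElem_cons h
      have hgetD : arr.getD i 0 = arr[i] := List.getD_eq_getElem arr 0 h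
      rw [hdrop, List.zip_cons_cons, List.all_cons, Bool.and_eq_true]
      by_cases hv : (if w then arr.getD i 0 > 0 else arr.getD i 0 < 0)
      · rw [if_pos hv]
        rw [ih (i + 1) (by omega)]
        rw [hgetD] at hv
        have hok : okB (arr[i], w) = true := by
          cases w <;> simp [okB] at hv ⊢ <;> omega
        constructor
        · rintro ⟨h1, h2⟩; exact ⟨by omega, hok, h2⟩
        · rintro ⟨h1, _, h2⟩; exact ⟨by omega, h2⟩
      · rw [if_neg hv]
        rw [hgetD] at hv
        constructor
        · intro hcontra; exact absurd hcontra (by simp)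
        · rintro ⟨h1, hok, h2⟩
          exfalso
          cases w <;> simp [okB] at hok hv <;> omega
    · rw [if_neg h]
      have : i = arr.length := by omega
      constructor
      · intro hcontra; exact absurd hcontra (by simp)
      · rintro ⟨h1, _⟩; omega

theorem build_some (L : Nat) :
    ∀ (p : List Int) (E F : List Bool),
      matches1AltBuild L p E = some F → F = E ++ patE p := by
  intro p
  induction p with
  | nil => intro E F h; simp [matches1AltBuild] at h; simp [patE, h]
  | cons s p ih =>
    intro E F h
    simp only [matches1AltBuild] at h
    by_cases hb : E.length + s.natAbs > L
    · rw [if_pos hb] at h; exact absurd h (by simp)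
    · rw [if_neg hb] at h
      have := ih _ _ h
      simp [patE, this]

theorem build_none (L : Nat) :
    ∀ (p : List Int) (E : List Bool),
      matches1AltBuild L p E = none → E.length + (patE p).length > L := by
  intro p
  induction p with
  | nil => intro E h; simp [matches1AltBuild] at h
  | cons s p ih =>
    intro E h
    simp only [matches1AltBuild] at h
    have hlen : (patE (s :: p)).length = s.natAbs + (patE p).length := by
      simp [patE]
    by_cases hb : E.length + s.natAbs > L
    · omega
    · rw [if_neg hb] at h
      have := ih _ h
      simp at this
      omega

-- ===== VERDICT (by name: the statement is the Claim_ definition above) =====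
theorem matches1_spec : Claim_equal_matches1 := by
  intro arr p _
  unfold Spec_matches1
  show matches1 arr p = matches1_alt arr p
  unfold matches1 matches1_alt
  simp only [foldA_eq_specCheck]
  have hiff := specCheck_iff arr (patE p) 0 (Nat.zero_le _)
  simp only [List.drop_zero, Nat.zero_add] at hiff
  cases hb : matches1AltBuild arr.length p [] with
  | none =>
    have hlong : (patE p).length > arr.length := by
      have := build_none arr.length p [] hb
      simpa using this
    cases h : specCheck arr 0 (patE p) with
    | none => rfl
    | some j =>
      rw [h] at hiff
      simp only
      rw [if_neg (by
        intro hj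
        subst hj
        exact absurd (hiff.mp rfl).1 (by omega))]
  | some E =>
    have hE : E = patE p := by simpa using build_some arr.length p [] E hb
    subst hE
    cases h : specCheck arr 0 (patE p) with
    | none =>
      rw [h] at hiff
      simp only
      by_cases hlen : (patE p).length = arr.length
      · rw [if_neg (by simp [hlen])]
        by_cases hall : (arr.zip (patE p)).all okB = true
        · exact absurd (hiff.mpr ⟨hlen, hall⟩) (by simp)
        · rw [if_neg (by simpa [okB] using hall)]
      · rw [if_pos (by simpa using hlen)]
    | some j =>
      rw [h] at hiff
      simp only
      by_cases hj : j = arr.length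
      · subst hj
        obtain ⟨hlen, hall⟩ := hiff.mp rfl
        rw [if_pos rfl, if_neg (by simp [hlen]), if_pos (by simpa [okB] using hall)]
      · rw [if_neg hj]
        by_cases hlen : (patE p).length = arr.length
        · rw [if_neg (by simp [hlen])]
          by_cases hall : (arr.zip (patE p)).all okB = true
          · exact absurd (hiff.mpr ⟨hlen, hall⟩) (by simp [hj])
          · rw [if_neg (by simpa [okB] using hall)]
        · rw [if_pos (by simpa using hlen)]
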